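-- pv_equiv track=rewrite | github.com/jincinga24-hue/vibestack | roastmymvp/roastmymvp/personas/generator.py | _extract_competitor
-- ===== SOURCE A (Python) =====
-- def _extract_competitor(description: str) -> tuple[bool, str | None]:
--     keywords = ["using", "competitor", "alternative", "currently use", "already use"]
--     has_alt = any(kw in description.lower() for kw in keywords)
--     alt_name = None
--     if has_alt:
--         words = description.split()
--         for i, w in enumerate(words):
--             if w.lower() in ("competitor", "using") and i + 1 < len(words):
--                 alt_name = words[i + 1].strip(".,;")
--                 break
--     return has_alt, alt_name
-- ===== SOURCE B (Python) =====
-- def _extract_competitor(description: str) -> tuple[bool, str | None]: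
--     keywords = ["using", "competitor", "alternative", "currently use", "already use"]
--     has_alt = any(kw in description.lower() for kw in keywords)
--     alt_name = None
--     if has_alt:
--         rest = description
--         while True:
--             parts = rest.split(None, 1)
--             if len(parts) < 2:
--                 break
--             head, rest = parts
--             if head.lower() in ("competitor", "using"):
--                 alt_name = rest.split(None, 1)[0].strip(".,;")
--                 break
--     return has_alt, alt_name
-- ===== Notes on version B (the rewrite author's own statement) =====
-- stated objective: alternative
-- what changed: The keyword substring check is kept, but the competitor-name extraction no longer splits the whole description and scans enumerate(words) with an index bound and words[i+1]: B peels one token at a time with rest.split(None, 1), checking each head word and taking the first word of the remainder on a hit.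
import Mathlib
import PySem

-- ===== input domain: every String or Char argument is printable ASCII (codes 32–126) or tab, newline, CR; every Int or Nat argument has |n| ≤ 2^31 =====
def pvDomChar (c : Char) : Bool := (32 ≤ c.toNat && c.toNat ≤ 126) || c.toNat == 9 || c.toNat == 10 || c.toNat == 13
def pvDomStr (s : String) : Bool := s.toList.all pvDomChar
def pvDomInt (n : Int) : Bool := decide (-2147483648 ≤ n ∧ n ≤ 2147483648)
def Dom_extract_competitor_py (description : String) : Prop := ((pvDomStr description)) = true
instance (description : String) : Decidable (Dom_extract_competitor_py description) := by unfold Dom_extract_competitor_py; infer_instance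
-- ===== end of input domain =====

-- B replaces A's full split + enumerate/index scan by peeling one token at a time with split(None, 1); same return value, alternative decomposition.


-- ===== PORT A =====
-- 'for i, w in enumerate(words): if w.lower() in ("competitor", "using") and i + 1 < len(words): alt_name = words[i+1].strip(".,;"); break'
def extractLoopA (words : List String) : List (Int × String) → Option String
  | [] => none
  | (i, w) :: t =>
    if (PySem.Str.lower w == "competitor" || PySem.Str.lower w == "using")
        && decide (i + 1 < (words.length : Int)) then
      -- words[i+1]: the guard 'i + 1 < len(words)' keeps the index in range, so pyGetD with default "" is exact here
      some (PySem.Str.stripChars (PySem.List.pyGetD words (i + 1) "") ".,;")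
    else
      extractLoopA words t

def extract_competitor_py (description : String) : Bool × Option String :=
  let keywords : List String := ["using", "competitor", "alternative", "currently use", "already use"]
  let has_alt := keywords.any (fun kw => PySem.Str.isIn kw (PySem.Str.lower description))
  let alt_name : Option String :=
    if has_alt then
      extractLoopA (PySem.Str.split₀ description) (PySem.List.enumerate (PySem.Str.split₀ description) 0)
    else none
  (has_alt, alt_name)

-- ===== PORT B =====
-- One-step unfolding of rest.split(None, 1); needed (only) to justify termination of B's peel loop below.
lemma pv_split0Max_one (cs : List Char) :
    PySem.Chars.split₀Max cs 1 =
      if (cs.dropWhile PySem.Chars.isspace) = [] then []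
      else
        ((cs.dropWhile PySem.Chars.isspace).takeWhile (fun c => !PySem.Chars.isspace c)) ::
        (if ((cs.dropWhile PySem.Chars.isspace).dropWhile (fun c => !PySem.Chars.isspace c)).dropWhile PySem.Chars.isspace = [] then []
         else [((cs.dropWhile PySem.Chars.isspace).dropWhile (fun c => !PySem.Chars.isspace c)).dropWhile PySem.Chars.isspace]) := by
  unfold PySem.Chars.split₀Max
  rcases h : cs.dropWhile PySem.Chars.isspace with _ | ⟨c, t⟩
  · simp [PySem.Chars.split₀Max.go, h]
  · have hlen : 0 < cs.length := by
      by_contra hn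
      have : cs = [] := by cases cs <;> simp_all
      simp [this] at h
    obtain ⟨n, hn⟩ : ∃ n, cs.length = n + 1 := ⟨cs.length - 1, by omega⟩
    rw [hn]
    simp only [PySem.Chars.split₀Max.go, h]
    rcases h2 : ((c :: t).dropWhile (fun c => !PySem.Chars.isspace c)).dropWhile PySem.Chars.isspace with _ | ⟨d, u⟩ <;>
      simp

-- Termination of B's peel loop: the remainder piece of rest.split(None, 1) is strictly shorter than rest.
lemma pv_peel_lt {s : String} {head rest' : String} {tl : List String}
    (hp : PySem.Str.split₀Max s 1 = head :: rest' :: tl) :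
    rest'.toList.length < s.toList.length := by
  unfold PySem.Str.split₀Max at hp
  rw [pv_split0Max_one s.toList] at hp
  split_ifs at hp with h1 h2
  · simp at hp
  · simp at hp
  · simp only [List.map_cons, List.map_nil, List.cons.injEq] at hp
    obtain ⟨-, h3, -⟩ := hp
    have hr : rest'.toList =
        ((s.toList.dropWhile PySem.Chars.isspace).dropWhile (fun c => !PySem.Chars.isspace c)).dropWhile PySem.Chars.isspace := by
      rw [← h3]; simp
    rcases hl : s.toList.dropWhile PySem.Chars.isspace with _ | ⟨c, t⟩
    · exact absurd hl h1
    have htok : 0 < ((c :: t).takeWhile (fun c => !PySem.Chars.isspace c)).length := by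
      have hc := List.dropWhile_get_zero_not (p := PySem.Chars.isspace) s.toList (by rw [hl]; simp)
      rw [List.takeWhile_cons_of_pos (by simpa [hl] using hc)]
      simp
    have hsplit := congrArg List.length (List.takeWhile_append_dropWhile
      (p := fun c => !PySem.Chars.isspace c) (l := c :: t))
    rw [List.length_append] at hsplit
    have hdl : s.toList.length ≥ (c :: t).length := by
      simpa [hl] using List.length_dropWhile_le (p := PySem.Chars.isspace) s.toList
    have hfin : rest'.toList.length ≤ ((c :: t).dropWhile (fun c => !PySem.Chars.isspace c)).length := by
      rw [hr, hl]; exact List.length_dropWhile_le _ _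
    simp only [List.length_cons] at hsplit hdl
    omega

-- 'while True: parts = rest.split(None, 1); if len(parts) < 2: break; head, rest = parts; if head.lower() in …: alt_name = rest.split(None, 1)[0].strip(".,;"); break'
def extractLoopB (rest : String) : Option String :=
  match hp : PySem.Str.split₀Max rest 1 with
  | [] => none
  | [_] => none
  | head :: rest' :: _ =>
    if PySem.Str.lower head == "competitor" || PySem.Str.lower head == "using" then
      -- rest'.split(None, 1)[0]: rest' always holds at least one word here, so pyGetD with default "" is exact
      some (PySem.Str.stripChars (PySem.List.pyGetD (PySem.Str.split₀Max rest' 1) 0 "") ".,;")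
    else
      extractLoopB rest'
termination_by rest.toList.length
decreasing_by apply pv_peel_lt; assumption

def extract_competitor_py_alt (description : String) : Bool × Option String :=
  let keywords : List String := ["using", "competitor", "alternative", "currently use", "already use"]
  let has_alt := keywords.any (fun kw => PySem.Str.isIn kw (PySem.Str.lower description))
  let alt_name : Option String :=
    if has_alt then extractLoopB description else none
  (has_alt, alt_name)

-- ===== PRECONDITION & SPEC =====
def Spec_extract_competitor_py (description : String) (out : Bool × Option String) : Prop := out = extract_competitor_py_alt description
instance (description : String) (out : Bool × Option String) : Decidable (Spec_extract_competitor_py description out) := by unfold Spec_extract_competitor_py; infer_instance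

-- ===== CLAIM (what is proved, stated in full; the proofs are below) =====
def Claim_equal_extract_competitor_py : Prop := ∀ (description : String), Dom_extract_competitor_py description → Spec_extract_competitor_py description (extract_competitor_py description)

-- ===== LEMMAS AND PROOFS =====

lemma pv_go_nil (cur : List Char) (acc : List (List Char)) :
    PySem.Chars.split₀.go [] cur acc =
      if cur = [] then acc.reverse else acc.reverse ++ [cur.reverse] := by
  by_cases h : cur = [] <;> simp [PySem.Chars.split₀.go, h]

lemma pv_go_cons (c : Char) (t cur : List Char) (acc : List (List Char)) :
    PySem.Chars.split₀.go (c :: t) cur acc =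
      if PySem.Chars.isspace c then
        (if cur = [] then PySem.Chars.split₀.go t [] acc
         else PySem.Chars.split₀.go t [] (cur.reverse :: acc))
      else PySem.Chars.split₀.go t (c :: cur) acc := by
  by_cases hs : PySem.Chars.isspace c <;> by_cases h : cur = [] <;>
    simp [PySem.Chars.split₀.go, hs, h]

lemma pv_go_acc (cs : List Char) : ∀ (cur : List Char) (acc : List (List Char)),
    PySem.Chars.split₀.go cs cur acc = acc.reverse ++ PySem.Chars.split₀.go cs cur [] := by
  induction cs with
  | nil => intro cur acc; rw [pv_go_nil, pv_go_nil]; split_ifs <;> simp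
  | cons c t ih =>
    intro cur acc
    rw [pv_go_cons, pv_go_cons]
    split_ifs with hs h
    · exact ih [] acc
    · rw [ih [] (cur.reverse :: acc), ih [] [cur.reverse]]; simp
    · exact ih _ acc

lemma pv_go_skip (cs : List Char) (acc : List (List Char)) :
    PySem.Chars.split₀.go (cs.dropWhile PySem.Chars.isspace) [] acc = PySem.Chars.split₀.go cs [] acc := by
  induction cs with
  | nil => simp
  | cons c t ih =>
    by_cases hs : PySem.Chars.isspace c
    · rw [List.dropWhile_cons_of_pos (by simpa using hs), ih, pv_go_cons]
      simp [hs]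
    · rw [List.dropWhile_cons_of_neg (by simpa using hs)]

lemma pv_split0_skip (cs : List Char) :
    PySem.Chars.split₀ (cs.dropWhile PySem.Chars.isspace) = PySem.Chars.split₀ cs :=
  pv_go_skip cs []

lemma pv_go_build (cs : List Char) : ∀ (cur : List Char) (acc : List (List Char)),
    PySem.Chars.split₀.go cs cur acc =
      PySem.Chars.split₀.go (cs.dropWhile (fun c => !PySem.Chars.isspace c))
        ((cs.takeWhile (fun c => !PySem.Chars.isspace c)).reverse ++ cur) acc := by
  induction cs with
  | nil => simp
  | cons c t ih =>
    intro cur acc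
    by_cases hs : PySem.Chars.isspace c
    · rw [List.dropWhile_cons_of_neg (by simp [hs]), List.takeWhile_cons_of_neg (by simp [hs])]
      simp
    · rw [List.dropWhile_cons_of_pos (by simp [hs]), List.takeWhile_cons_of_pos (by simp [hs]),
        pv_go_cons, if_neg hs, ih (c :: cur) acc]
      simp

lemma pv_split0_step (cs : List Char) :
    PySem.Chars.split₀ cs =
      if (cs.dropWhile PySem.Chars.isspace) = [] then []
      else ((cs.dropWhile PySem.Chars.isspace).takeWhile (fun c => !PySem.Chars.isspace c)) ::
           PySem.Chars.split₀ ((cs.dropWhile PySem.Chars.isspace).dropWhile (fun c => !PySem.Chars.isspace c)) := by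
  unfold PySem.Chars.split₀
  rw [← pv_go_skip cs []]
  rcases h : cs.dropWhile PySem.Chars.isspace with _ | ⟨c, t⟩
  · simp [pv_go_nil]
  · have hc : ¬ (PySem.Chars.isspace c = true) := by
      have := List.dropWhile_get_zero_not (p := PySem.Chars.isspace) cs (by rw [h]; simp)
      simpa [h] using this
    rw [pv_go_build (c :: t) [] []]
    rw [List.takeWhile_cons_of_pos (by simp [hc]), List.dropWhile_cons_of_pos (by simp [hc])]
    rcases h2 : t.dropWhile (fun c => !PySem.Chars.isspace c) with _ | ⟨d, u⟩
    · rw [pv_go_nil]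
      simp [PySem.Chars.split₀.go]
    · have hd : PySem.Chars.isspace d = true := by
        have := List.dropWhile_get_zero_not (p := fun c => !PySem.Chars.isspace c) t (by rw [h2]; simp)
        simpa [h2] using this
      rw [pv_go_cons, if_pos hd, if_neg (by simp), pv_go_acc u]
      conv_rhs => rw [pv_go_cons]
      simp [hd]

-- the common reading of both loops: scan adjacent word pairs, strip the word after the first keyword
def pvPairScan : List String → Option String
  | w :: nxt :: t =>
    if PySem.Str.lower w == "competitor" || PySem.Str.lower w == "using" then
      some (PySem.Str.stripChars nxt ".,;")
    else pvPairScan (nxt :: t)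
  | _ => none

lemma pv_pairScan_not_key (w : String) (t : List String)
    (hw : (PySem.Str.lower w == "competitor" || PySem.Str.lower w == "using") = false) :
    pvPairScan (w :: t) = pvPairScan t := by
  cases t with
  | nil => rfl
  | cons nxt t' => simp [pvPairScan, hw]

lemma pv_loopA_pairScan (words : List String) :
    ∀ (suf pre : List String), words = pre ++ suf →
      extractLoopA words (PySem.List.enumerate suf (pre.length : Int)) = pvPairScan suf := by
  intro suf
  induction suf with
  | nil => intro pre _; simp [PySem.List.enumerate, extractLoopA, pvPairScan]
  | cons w t ih =>
    intro pre hw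
    rw [PySem.List.enumerate_cons, extractLoopA]
    by_cases hk : (PySem.Str.lower w == "competitor" || PySem.Str.lower w == "using") = true
    · cases t with
      | nil =>
        have hlen : ¬ ((pre.length : Int) + 1 < (words.length : Int)) := by
          subst hw; simp only [List.length_append, List.length_cons, List.length_nil]; omega
        rw [if_neg (by simp [hlen])]
        simp [extractLoopA, pvPairScan]
      | cons nxt t' =>
        have hlen : (pre.length : Int) + 1 < (words.length : Int) := by
          subst hw; simp only [List.length_append, List.length_cons, List.length_nil]; omega
        rw [if_pos (by simp [hk, hlen])]
        have hget : PySem.List.pyGetD words ((pre.length : Int) + 1) "" = nxt := by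
          have : ((pre.length : Int) + 1) = ((pre.length + 1 : Nat) : Int) := by push_cast; ring
          rw [this, PySem.List.pyGetD_natCast, hw]
          rw [List.getD_eq_getElem?_getD]
          rw [List.getElem?_append_right (by omega)]
          simp
        rw [hget]
        simp [pvPairScan, hk]
    · have hk' : (PySem.Str.lower w == "competitor" || PySem.Str.lower w == "using") = false := by
        simpa using hk
      rw [if_neg (by simp [hk']), pv_pairScan_not_key w t hk']
      have : (pre.length : Int) + 1 = (((pre ++ [w]).length : Nat) : Int) := by simp
      rw [this]
      exact ih (pre ++ [w]) (by simpa using hw)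

lemma pv_loopB_pairScan (rest : String) :
    extractLoopB rest = pvPairScan (PySem.Str.split₀ rest) := by
  have hsm : PySem.Str.split₀Max rest 1 = List.map String.ofList (PySem.Chars.split₀Max rest.toList 1) := rfl
  have hs0 : PySem.Str.split₀ rest = List.map String.ofList (PySem.Chars.split₀ rest.toList) := rfl
  rw [extractLoopB]
  split
  · -- rest.split(None, 1) = []
    rename_i hp
    rw [hsm, pv_split0Max_one] at hp
    split_ifs at hp with hE
    · rw [hs0, pv_split0_step, if_pos hE]
      rfl
    · simp at hp
    · simp at hp
  · -- rest.split(None, 1) = [head]: a single word, no following token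
    rename_i head hp
    rw [hsm, pv_split0Max_one] at hp
    split_ifs at hp with hE hR
    · simp at hp
    · rw [hs0, pv_split0_step, if_neg hE, ← pv_split0_skip ((rest.toList.dropWhile PySem.Chars.isspace).dropWhile (fun c => !PySem.Chars.isspace c)), hR]
      rfl
    · simp at hp
  · -- rest.split(None, 1) = [head, rest']
    rename_i head rest' tail hp
    have hp' := hp
    rw [hsm, pv_split0Max_one] at hp'
    split_ifs at hp' with hE hR
    · simp at hp'
    · simp at hp'
    · simp only [List.map_cons, List.map_nil, List.cons.injEq] at hp'
      obtain ⟨hhead, hrest', htail⟩ := hp'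
      set r := ((rest.toList.dropWhile PySem.Chars.isspace).dropWhile (fun c => !PySem.Chars.isspace c)).dropWhile PySem.Chars.isspace with hrdef
      have hrl : rest'.toList = r := by rw [← hrest']; simp
      -- r starts with a non-space char
      rcases hru : r with _ | ⟨d, u⟩
      · exact absurd hru hR
      have hd : ¬ (PySem.Chars.isspace d = true) := by
        have := List.dropWhile_get_zero_not (p := PySem.Chars.isspace)
          ((rest.toList.dropWhile PySem.Chars.isspace).dropWhile (fun c => !PySem.Chars.isspace c)) (by rw [← hrdef, hru]; simp)
        simpa [← hrdef, hru] using this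
      have hdu : (d :: u).dropWhile PySem.Chars.isspace = d :: u :=
        List.dropWhile_cons_of_neg (by simpa using hd)
      have h2 : PySem.Chars.split₀ rest.toList =
          ((rest.toList.dropWhile PySem.Chars.isspace).takeWhile (fun c => !PySem.Chars.isspace c)) ::
            PySem.Chars.split₀ (d :: u) := by
        rw [pv_split0_step, if_neg hE, ← pv_split0_skip ((rest.toList.dropWhile PySem.Chars.isspace).dropWhile (fun c => !PySem.Chars.isspace c)), ← hrdef, hru]
      have h3 : PySem.Chars.split₀ (d :: u) =
          ((d :: u).takeWhile (fun c => !PySem.Chars.isspace c)) ::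
            PySem.Chars.split₀ ((d :: u).dropWhile (fun c => !PySem.Chars.isspace c)) := by
        rw [pv_split0_step, hdu]
        simp
      rw [hs0, h2, h3]
      simp only [List.map_cons]
      split_ifs with hk
      · -- keyword hit: B reads the first word of rest', A's scan strips the next token
        have hget : PySem.List.pyGetD (PySem.Str.split₀Max rest' 1) 0 "" =
            String.ofList ((d :: u).takeWhile (fun c => !PySem.Chars.isspace c)) := by
          have hb : PySem.Str.split₀Max rest' 1 = List.map String.ofList (PySem.Chars.split₀Max rest'.toList 1) := rfl
          rw [hb, hrl, hru, pv_split0Max_one, hdu, if_neg (by simp)]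
          split_ifs <;> simp [PySem.List.pyGetD]
        rw [hget, hhead]
        simp [pvPairScan, hk]
      · have hk' := (Bool.not_eq_true _).mp hk
        rw [pv_loopB_pairScan rest']
        have hbs : PySem.Str.split₀ rest' = List.map String.ofList (PySem.Chars.split₀ rest'.toList) := rfl
        rw [hbs, hrl, hru, h3]
        simp only [List.map_cons]
        rw [hhead, pv_pairScan_not_key _ _ hk']
termination_by rest.toList.length
decreasing_by apply pv_peel_lt; assumption

-- ===== VERDICT (by name: the statement is the Claim_ definition above) =====
theorem extract_competitor_py_spec : Claim_equal_extract_competitor_py := by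
  intro description _
  unfold Spec_extract_competitor_py extract_competitor_py extract_competitor_py_alt
  simp only
  congr 1
  split_ifs
  · rw [pv_loopB_pairScan]
    have h0 : ((0 : Int)) = ((([] : List String).length : Nat) : Int) := by simp
    rw [show (PySem.List.enumerate (PySem.Str.split₀ description) 0) =
        (PySem.List.enumerate (PySem.Str.split₀ description) ((([] : List String).length : Nat) : Int)) by rw [← h0]]
    exact pv_loopA_pairScan (PySem.Str.split₀ description) (PySem.Str.split₀ description) [] (by simp)
  · rfl
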